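-- pv_equiv track=rewrite | github.com/LuKuoChen/Python | Exercise/5. Find duplicate.py | duplicate_check
-- ===== SOURCE A (Python) =====
-- def duplicate_check(x):
--     repeat = []
--     not_repeat = []
--     for i in x:
--         if x.count(i) > 1 and i not in repeat:
--             repeat.append(i)
--         elif x.count(i) <= 1 and i not in not_repeat:
--             not_repeat.append(i)
--     return sorted(repeat), sorted(not_repeat)
-- ===== SOURCE B (Python) =====
-- def duplicate_check(x):
--     counts = {}
--     for i in x:
--         counts[i] = counts.get(i, 0) + 1
--     repeat = []
--     not_repeat = []
--     for k in sorted(counts):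
--         if counts[k] > 1:
--             repeat.append(k)
--         else:
--             not_repeat.append(k)
--     return repeat, not_repeat
-- ===== Notes on version B (the rewrite author's own statement) =====
-- stated objective: faster
-- what changed: Replaces A's quadratic repeated x.count scans and membership-dedup loop with a single counting pass into a dict followed by one partition of the sorted distinct keys, so no per-element rescans and no final sorts of two lists.
import Mathlib
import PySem

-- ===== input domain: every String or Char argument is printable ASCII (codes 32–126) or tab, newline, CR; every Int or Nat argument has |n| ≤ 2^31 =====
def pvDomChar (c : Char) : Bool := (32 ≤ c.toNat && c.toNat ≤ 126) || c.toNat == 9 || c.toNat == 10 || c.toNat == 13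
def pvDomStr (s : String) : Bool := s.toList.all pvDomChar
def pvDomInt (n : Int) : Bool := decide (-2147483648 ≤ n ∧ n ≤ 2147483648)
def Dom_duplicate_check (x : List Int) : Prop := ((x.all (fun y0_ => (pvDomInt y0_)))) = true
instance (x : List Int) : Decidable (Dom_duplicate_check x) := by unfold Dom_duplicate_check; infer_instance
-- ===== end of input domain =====

-- B replaces A's repeated x.count scans and membership dedup with one counting dict plus one partition of the sorted distinct keys.

-- ===== PORT A =====
def duplicate_check (x : List Int) : List Int × List Int :=
  let st := x.foldl (fun (pr : List Int × List Int) i =>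
    if 1 < x.count i ∧ i ∉ pr.1 then (pr.1 ++ [i], pr.2)
    else if x.count i ≤ 1 ∧ i ∉ pr.2 then (pr.1, pr.2 ++ [i])
    else pr) ([], [])
  (PySem.List.sorted st.1 (fun k => k) false, PySem.List.sorted st.2 (fun k => k) false)

-- ===== PORT B =====
def duplicate_check_alt (x : List Int) : List Int × List Int :=
  let counts : PySem.Dict Int Int := x.foldl (fun d i => d.insert i (d.getD i 0 + 1)) PySem.Dict.empty
  let ks := PySem.List.sorted counts.keys (fun k => k) false
  ks.foldl (fun (pr : List Int × List Int) k =>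
    if 1 < counts.getD k 0 then (pr.1 ++ [k], pr.2) else (pr.1, pr.2 ++ [k])) ([], [])

-- ===== PRECONDITION & SPEC =====
def Spec_duplicate_check (x : List Int) (out : List Int × List Int) : Prop := out = duplicate_check_alt x
instance (x : List Int) (out : List Int × List Int) : Decidable (Spec_duplicate_check x out) := by unfold Spec_duplicate_check; infer_instance

-- ===== CLAIM (what is proved, stated in full; the proofs are below) =====
def Claim_equal_duplicate_check : Prop := ∀ (x : List Int), Dom_duplicate_check x → Spec_duplicate_check x (duplicate_check x)

-- ===== LEMMAS AND PROOFS =====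

theorem dedup_append_singleton (l : List Int) (i : Int) :
    PySem.List.dedup (l ++ [i]) = if i ∈ l then PySem.List.dedup l else PySem.List.dedup l ++ [i] := by
  simp only [PySem.List.dedup_eq_ofList, PySem.Set.ofList_eq_foldl, List.foldl_append,
    List.foldl_cons, List.foldl_nil]
  rw [← PySem.Set.ofList_eq_foldl]
  simp [PySem.Set.add, PySem.Set.contains]

-- A's loop keeps the first-occurrence dedup of the scanned prefix, split by whether the element repeats in x.
theorem dupA_fold_inv (x : List Int) : ∀ (rest l : List Int),
    rest.foldl (fun (pr : List Int × List Int) i =>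
      if 1 < x.count i ∧ i ∉ pr.1 then (pr.1 ++ [i], pr.2)
      else if x.count i ≤ 1 ∧ i ∉ pr.2 then (pr.1, pr.2 ++ [i])
      else pr)
      ((PySem.List.dedup l).filter (fun i => decide (1 < x.count i)),
       (PySem.List.dedup l).filter (fun i => decide (x.count i ≤ 1)))
    = ((PySem.List.dedup (l ++ rest)).filter (fun i => decide (1 < x.count i)),
       (PySem.List.dedup (l ++ rest)).filter (fun i => decide (x.count i ≤ 1))) := by
  intro rest
  induction rest with
  | nil => intro l; simp
  | cons i rest' ih =>
    intro l
    rw [List.foldl_cons]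
    have hkey : (if 1 < x.count i ∧ i ∉ (PySem.List.dedup l).filter (fun j => decide (1 < x.count j)) then
          ((PySem.List.dedup l).filter (fun j => decide (1 < x.count j)) ++ [i],
           (PySem.List.dedup l).filter (fun j => decide (x.count j ≤ 1)))
        else if x.count i ≤ 1 ∧ i ∉ (PySem.List.dedup l).filter (fun j => decide (x.count j ≤ 1)) then
          ((PySem.List.dedup l).filter (fun j => decide (1 < x.count j)),
           (PySem.List.dedup l).filter (fun j => decide (x.count j ≤ 1)) ++ [i])
        else
          ((PySem.List.dedup l).filter (fun j => decide (1 < x.count j)),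
           (PySem.List.dedup l).filter (fun j => decide (x.count j ≤ 1))))
        = ((PySem.List.dedup (l ++ [i])).filter (fun j => decide (1 < x.count j)),
           (PySem.List.dedup (l ++ [i])).filter (fun j => decide (x.count j ≤ 1))) := by
      rw [dedup_append_singleton]
      by_cases hP : 1 < x.count i
      · by_cases hi : i ∈ l <;>
          simp [List.mem_filter, hP, hi, List.filter_append]
      · have h1 : x.count i ≤ 1 := by omega
        by_cases hi : i ∈ l <;>
          simp [List.mem_filter, hP, hi, h1, List.filter_append]
    rw [hkey]
    have := ih (l ++ [i])
    simpa [List.append_assoc] using this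

-- sorting commutes with filtering the (nodup) dedup list
theorem sorted_filter_dedup (x : List Int) (p : Int → Bool) :
    PySem.List.sorted ((PySem.List.dedup x).filter p) (fun k => k) false
      = (PySem.List.sorted (PySem.List.dedup x) (fun k => k) false).filter p := by
  apply PySem.List.sorted_eq_of_perm_of_pairwise_lt
  · exact (PySem.List.sorted_perm _ _ _).filter p
  · exact List.Pairwise.sublist List.filter_sublist
      (by simpa using PySem.List.sorted_ofList_pairwise_lt (xs := x))

-- B's partition loop over the sorted keys is two filters
theorem dupB_fold_eq_filters (x ks : List Int) :
    ks.foldl (fun (pr : List Int × List Int) k =>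
      if 1 < (PySem.Dict.counter x).getD k 0 then (pr.1 ++ [k], pr.2) else (pr.1, pr.2 ++ [k])) ([], [])
    = (ks.filter (fun k => decide (1 < x.count k)), ks.filter (fun k => decide (x.count k ≤ 1))) := by
  have hstep : (fun (pr : List Int × List Int) k =>
      if 1 < (PySem.Dict.counter x).getD k 0 then (pr.1 ++ [k], pr.2) else (pr.1, pr.2 ++ [k]))
      = fun (pr : List Int × List Int) k =>
        ((if 1 < x.count k then pr.1 ++ [k] else pr.1),
         (if x.count k ≤ 1 then pr.2 ++ [k] else pr.2)) := by
    funext pr k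
    rw [PySem.Dict.getD_counter]
    by_cases h : 1 < x.count k
    · have h' : 1 < (x.count k : Int) := by exact_mod_cast h
      have h2 : ¬ x.count k ≤ 1 := by omega
      simp [h, h', h2]
    · have h' : ¬ 1 < (x.count k : Int) := by exact_mod_cast h
      have h2 : x.count k ≤ 1 := by omega
      simp [h, h', h2]
  rw [hstep]
  rw [PySem.List.foldl_prod_mk (f := fun acc k => if 1 < x.count k then acc ++ [k] else acc)
      (g := fun acc k => if x.count k ≤ 1 then acc ++ [k] else acc)]
  rw [PySem.List.foldl_append_ite_eq_filter, PySem.List.foldl_append_ite_eq_filter]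
  simp

-- ===== VERDICT (by name: the statement is the Claim_ definition above) =====
theorem duplicate_check_spec : Claim_equal_duplicate_check := by
  unfold Claim_equal_duplicate_check Spec_duplicate_check
  intro x _
  unfold duplicate_check duplicate_check_alt
  simp only []
  have hA := dupA_fold_inv x x []
  simp only [List.nil_append] at hA
  have hinit : ((PySem.List.dedup ([] : List Int)).filter (fun i => decide (1 < x.count i)),
      (PySem.List.dedup ([] : List Int)).filter (fun i => decide (x.count i ≤ 1)))
      = (([] : List Int), ([] : List Int)) := rfl
  rw [hinit] at hA
  rw [hA]
  rw [PySem.Dict.foldl_insert_getD_add_one_eq_counter]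
  rw [PySem.Dict.keys_counter]
  rw [dupB_fold_eq_filters]
  rw [sorted_filter_dedup, sorted_filter_dedup]
  simp [PySem.List.dedup_eq_ofList]
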